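-- pv_equiv track=rewrite | github.com/IvanTurHi/diplom | src/population_module.py | transfrom_address
-- ===== SOURCE A (Python) =====
-- def transfrom_address(address):
--     space_list = address.split(' ')
--     new_s = ''
--     new_s += space_list[-1] + ' '
--     for j in range(len(space_list) - 1):
--         new_s += space_list[j] + ' '
--     new_s = new_s[:-1]
--
--     return new_s
-- ===== SOURCE B (Python) =====
-- def transfrom_address(address):
--     idx = address.rfind(' ')
--     if idx == -1:
--         return address
--     return address[idx+1:] + ' ' + address[:idx]
-- ===== Notes on version B (the rewrite author's own statement) =====
-- stated objective: simpler
-- what changed: B finds the last space with rfind and moves the last word to the front by two slices, instead of tokenizing with split(' ') and rebuilding the string piece by piece in a loop with a trailing-space trim.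
import Mathlib
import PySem

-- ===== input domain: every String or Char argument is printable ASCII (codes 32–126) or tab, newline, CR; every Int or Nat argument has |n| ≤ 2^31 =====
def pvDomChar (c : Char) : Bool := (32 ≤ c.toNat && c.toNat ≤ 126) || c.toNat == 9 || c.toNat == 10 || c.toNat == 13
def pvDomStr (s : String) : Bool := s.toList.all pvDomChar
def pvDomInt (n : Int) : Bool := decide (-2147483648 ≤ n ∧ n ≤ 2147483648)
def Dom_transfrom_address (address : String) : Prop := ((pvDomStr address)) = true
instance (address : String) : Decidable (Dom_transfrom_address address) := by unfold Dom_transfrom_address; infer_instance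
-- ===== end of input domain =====

-- B moves the last word to the front by slicing at the last space found with rfind,
-- instead of tokenizing with split(' ') and rebuilding the string in a loop (objective: simpler).

-- ===== PORT A =====
def transfrom_address (address : String) : String :=
  let space_list := PySem.Chars.splitOn address.toList [' ']   -- address.split(' ')
  match PySem.List.pyGet? space_list (-1) with                 -- space_list[-1]
  | none => ""                                                 -- unreachable: split(' ') always returns a nonempty list
  | some last =>
    let new_s : List Char := [] ++ last ++ [' ']               -- new_s = '' ; new_s += space_list[-1] + ' '
    let new_s := (PySem.List.pyRange 0 ((space_list.length : Int) - 1) 1).foldl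
      (fun acc j => acc ++ PySem.List.pyGetD space_list j [] ++ [' ']) new_s
    String.ofList (PySem.List.slice new_s none (some (-1)))    -- new_s = new_s[:-1]

-- ===== PORT B =====
def transfrom_address_alt (address : String) : String :=
  let idx := PySem.Str.rfind address " "
  if idx = -1 then address
  else String.ofList (PySem.List.slice address.toList (some (idx + 1)) none ++ [' '] ++
                      PySem.List.slice address.toList none (some idx))

-- ===== PRECONDITION & SPEC =====
def Spec_transfrom_address (address : String) (out : String) : Prop := out = transfrom_address_alt address
instance (address : String) (out : String) : Decidable (Spec_transfrom_address address out) := by unfold Spec_transfrom_address; infer_instance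

-- ===== CLAIM (what is proved, stated in full; the proofs are below) =====
def Claim_equal_transfrom_address : Prop := ∀ (address : String), Dom_transfrom_address address → Spec_transfrom_address address (transfrom_address address)

-- ===== LEMMAS AND PROOFS =====

/-- Structural single-char split on ' ' (spec for `PySem.Chars.splitOn · [' ']`). -/
def spl : List Char → List (List Char)
  | [] => [[]]
  | c :: rest =>
    if c = ' ' then [] :: spl rest
    else (c :: (spl rest).headI) :: (spl rest).tail

theorem spl_ne_nil (cs : List Char) : spl cs ≠ [] := by
  cases cs with
  | nil => simp [spl]
  | cons c rest => simp only [spl]; split <;> simp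

theorem splitOn_go_eq (fuel : Nat) : ∀ (l cur : List Char) (accs : List (List Char)),
    l.length ≤ fuel →
    PySem.Chars.splitOn.go [' '] fuel l cur accs
      = accs.reverse ++ (cur.reverse ++ (spl l).headI) :: (spl l).tail := by
  induction fuel with
  | zero =>
    intro l cur accs hl
    have : l = [] := by cases l <;> simp_all
    subst this
    simp [PySem.Chars.splitOn.go, spl]
  | succ fuel ih =>
    intro l cur accs hl
    cases l with
    | nil => simp [PySem.Chars.splitOn.go, spl]
    | cons c rest =>
      by_cases hc : c = ' '
      · subst hc
        have hpre : [' '].isPrefixOf (' ' :: rest) = true := by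
          simp [List.isPrefixOf]
        rw [PySem.Chars.splitOn.go]
        simp only [hpre, if_pos]
        rw [show List.drop [' '].length (' ' :: rest) = rest from rfl]
        rw [ih rest [] (cur.reverse :: accs) (by simpa using Nat.lt_succ_iff.mp (by simpa using hl))]
        have hne := spl_ne_nil rest
        cases h : spl rest with
        | nil => exact absurd h hne
        | cons p ps => simp [spl, h]
      · have hpre : [' '].isPrefixOf (c :: rest) = false := by
          simp [List.isPrefixOf]
          exact fun h => hc h.symm
        rw [PySem.Chars.splitOn.go]
        rw [if_neg (by simp [hpre])]
        rw [ih rest (c :: cur) accs (by simpa using Nat.lt_succ_iff.mp (by simpa using hl))]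
        simp [spl, hc]

theorem splitOn_eq_spl (cs : List Char) : PySem.Chars.splitOn cs [' '] = spl cs := by
  unfold PySem.Chars.splitOn
  rw [splitOn_go_eq (cs.length + 1) cs [] [] (by omega)]
  cases h : spl cs with
  | nil => exact absurd h (spl_ne_nil cs)
  | cons p ps => simp

theorem spl_no_space {cs : List Char} (h : ' ' ∉ cs) : spl cs = [cs] := by
  induction cs with
  | nil => rfl
  | cons c rest ih =>
    have hc : c ≠ ' ' := fun hh => h (hh ▸ List.mem_cons_self)
    have hr : ' ' ∉ rest := fun hh => h (List.mem_cons_of_mem _ hh)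
    simp [spl, hc, ih hr]

theorem spl_append_space (xs ys : List Char) : spl (xs ++ ' ' :: ys) = spl xs ++ spl ys := by
  induction xs with
  | nil => simp [spl]
  | cons c rest ih =>
    by_cases hc : c = ' '
    · simp [spl, hc, ih]
    · have hne := spl_ne_nil rest
      cases h : spl rest with
      | nil => exact absurd h hne
      | cons p ps => simp [spl, hc, ih, h]

theorem join_cons_head (sep h : List Char) (c : Char) (t : List (List Char)) :
    PySem.Chars.join sep ((c :: h) :: t) = c :: PySem.Chars.join sep (h :: t) := by
  cases t with
  | nil => simp [PySem.Chars.join_singleton]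
  | cons q t' => simp [PySem.Chars.join_cons_cons]

theorem join_spl (cs : List Char) : PySem.Chars.join [' '] (spl cs) = cs := by
  induction cs with
  | nil => simp [spl, PySem.Chars.join_singleton]
  | cons c rest ih =>
    have hne := spl_ne_nil rest
    cases h : spl rest with
    | nil => exact absurd h hne
    | cons p ps =>
      by_cases hc : c = ' '
      · subst hc
        have hspl : spl (' ' :: rest) = [] :: p :: ps := by simp [spl, h]
        rw [hspl, PySem.Chars.join_cons_cons, ← h, ih]; simp
      · have hspl : spl (c :: rest) = (c :: p) :: ps := by simp [spl, h, hc]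
        rw [hspl, join_cons_head, ← h, ih]

-- rfind characterisation for the single-char needle [' ']

theorem rfind_go_no_space {cs : List Char} (h : ' ' ∉ cs) :
    ∀ j, PySem.Chars.rfind.go cs [' '] j = -1 := by
  intro j
  induction j with
  | zero =>
    rw [PySem.Chars.rfind.go]
    rw [if_neg]
    intro hp
    exact h ((List.isPrefixOf_iff_prefix.mp hp).subset (List.mem_singleton.mpr rfl))
  | succ j ih =>
    rw [PySem.Chars.rfind.go]
    rw [if_neg, ih]
    intro hp
    have hm := (List.isPrefixOf_iff_prefix.mp hp).subset (List.mem_singleton.mpr rfl)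
    exact h (List.mem_of_mem_drop hm)

theorem rfind_go_found {pre suf : List Char} (hs : ' ' ∉ suf) :
    ∀ j, pre.length ≤ j → PySem.Chars.rfind.go (pre ++ ' ' :: suf) [' '] j = (pre.length : Int) := by
  intro j
  induction j with
  | zero =>
    intro hj
    have hp : pre = [] := by cases pre <;> simp_all
    subst hp
    rw [PySem.Chars.rfind.go]
    simp [List.isPrefixOf]
  | succ j ih =>
    intro hj
    rcases Nat.lt_or_ge pre.length (j + 1) with hlt | hge
    · have hj' : pre.length ≤ j := Nat.lt_succ_iff.mp hlt
      have hd : List.drop (j + 1) (pre ++ ' ' :: suf) = List.drop (j - pre.length) suf := by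
        rw [List.drop_append, List.drop_eq_nil_of_le (by omega)]
        rw [show j + 1 - pre.length = (j - pre.length) + 1 by omega, List.drop_succ_cons]
        simp
      rw [PySem.Chars.rfind.go, hd]
      rw [if_neg, ih hj']
      intro hp
      have hm := (List.isPrefixOf_iff_prefix.mp hp).subset (List.mem_singleton.mpr rfl)
      exact hs (List.mem_of_mem_drop hm)
    · have heq : pre.length = j + 1 := le_antisymm hj hge
      rw [PySem.Chars.rfind.go]
      rw [if_pos, heq]
      have : List.drop (j + 1) (pre ++ ' ' :: suf) = ' ' :: suf := by
        rw [← heq, List.drop_left]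
      rw [this]
      simp [List.isPrefixOf]

theorem rfind_no_space {cs : List Char} (h : ' ' ∉ cs) : PySem.Chars.rfind cs [' '] = -1 := by
  unfold PySem.Chars.rfind
  exact rfind_go_no_space h _

theorem rfind_found {pre suf : List Char} (hs : ' ' ∉ suf) :
    PySem.Chars.rfind (pre ++ ' ' :: suf) [' '] = (pre.length : Int) := by
  unfold PySem.Chars.rfind
  exact rfind_go_found hs _ (by simp)

theorem exists_last_space {cs : List Char} (h : ' ' ∈ cs) :
    ∃ pre suf, cs = pre ++ ' ' :: suf ∧ ' ' ∉ suf := by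
  induction cs using List.reverseRecOn with
  | nil => simp at h
  | append_singleton ds c ih =>
    by_cases hc : c = ' '
    · exact ⟨ds, [], by simp [hc], by simp⟩
    · have hd : ' ' ∈ ds := by
        rcases List.mem_append.mp h with h1 | h1
        · exact h1
        · exact absurd (List.mem_singleton.mp h1).symm hc
      obtain ⟨p, s, heq, hns⟩ := ih hd
      refine ⟨p, s ++ [c], by simp [heq], fun hm => ?_⟩
      rcases List.mem_append.mp hm with h1 | h1
      · exact hns h1
      · exact hc (List.mem_singleton.mp h1).symm

theorem pyGet_neg_one_concat {α : Type} (xs : List α) (x : α) :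
    PySem.List.pyGet? (xs ++ [x]) (-1) = some x := by
  simp [PySem.List.pyGet?, PySem.List.pyIdx?]

theorem slice_neg_one_dropLast {α : Type} (xs : List α) :
    PySem.List.slice xs none (some (-1)) = xs.dropLast := by
  simp [PySem.List.slice, List.dropLast_eq_take]

theorem foldl_append_space (ps : List (List Char)) (hne : ps ≠ []) :
    ∀ init, ps.foldl (fun acc p => acc ++ p ++ [' ']) init
      = init ++ PySem.Chars.join [' '] ps ++ [' '] := by
  induction ps with
  | nil => exact absurd rfl hne
  | cons p t ih =>
    intro init
    cases t with
    | nil => simp [PySem.Chars.join_singleton]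
    | cons q r =>
      rw [List.foldl_cons, ih (by simp), PySem.Chars.join_cons_cons]
      simp

-- ===== VERDICT (by name: the statement is the Claim_ definition above) =====
theorem transfrom_address_spec : Claim_equal_transfrom_address := by
  intro address _
  unfold Spec_transfrom_address
  by_cases hsp : ' ' ∈ address.toList
  · obtain ⟨pre, suf, heq, hns⟩ := exists_last_space hsp
    -- B's side
    have hrf : PySem.Str.rfind address " " = (pre.length : Int) := by
      rw [PySem.Str.rfind_eq, show (" " : String).toList = [' '] from rfl, heq, rfind_found hns]
    have hBfrom : PySem.List.slice address.toList (some ((pre.length : Int) + 1)) none = suf := by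
      rw [PySem.List.slice_from _ (by omega), heq]
      rw [show (pre ++ ' ' :: suf) = (pre ++ [' ']) ++ suf by simp]
      rw [show ((pre.length : Int) + 1).toNat = (pre ++ [' ']).length by simp]
      exact List.drop_left
    have hBto : PySem.List.slice address.toList none (some (pre.length : Int)) = pre := by
      rw [PySem.List.slice_to _ (by omega), heq]
      rw [show ((pre.length : Int)).toNat = pre.length by omega]
      exact List.take_left
    have hB : transfrom_address_alt address = String.ofList (suf ++ [' '] ++ pre) := by
      unfold transfrom_address_alt
      rw [hrf, if_neg (by omega), hBfrom, hBto]
    -- A's side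
    have hsplit : PySem.Chars.splitOn address.toList [' '] = spl pre ++ [suf] := by
      rw [splitOn_eq_spl, heq, spl_append_space, spl_no_space hns]
    have hA : transfrom_address address = String.ofList (suf ++ [' '] ++ pre) := by
      unfold transfrom_address
      rw [hsplit]
      dsimp only
      rw [pyGet_neg_one_concat]
      dsimp only
      have hrange : PySem.List.pyRange 0 (((spl pre ++ [suf]).length : Int) - 1) 1
          = PySem.List.pyRange 0 (((spl pre).length : Int)) 1 := by
        congr 1
        simp
      rw [hrange]
      have hcong : (PySem.List.pyRange 0 (((spl pre).length : Int)) 1).foldl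
            (fun acc j => acc ++ PySem.List.pyGetD (spl pre ++ [suf]) j [] ++ [' ']) ([] ++ suf ++ [' '])
          = (PySem.List.pyRange 0 (((spl pre).length : Int)) 1).foldl
            (fun acc j => acc ++ PySem.List.pyGetD (spl pre) j [] ++ [' ']) ([] ++ suf ++ [' ']) := by
        refine PySem.List.foldl_congr_mem _ _ _ _ ?_
        intro acc x hx
        obtain ⟨h0, h1⟩ := PySem.List.mem_pyRange_one.mp hx
        rw [PySem.List.pyGetD_of_nonneg _ _ h0, PySem.List.pyGetD_of_nonneg _ _ h0]
        rw [List.getD_append _ _ _ _ (by omega)]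
      rw [hcong, PySem.List.foldl_pyRange_zero_pyGetD' (spl pre) [] (fun acc p => acc ++ p ++ [' ']) _]
      rw [foldl_append_space (spl pre) (spl_ne_nil pre), join_spl]
      rw [show ([] ++ suf ++ [' ']) ++ pre ++ [' '] = (suf ++ [' '] ++ pre) ++ [' '] by simp]
      rw [slice_neg_one_dropLast, List.dropLast_concat]
    rw [hA, hB]
  · -- no space: both return the input unchanged
    have hA : transfrom_address address = address := by
      unfold transfrom_address
      rw [splitOn_eq_spl, spl_no_space hsp]
      dsimp only
      rw [show ([address.toList] : List (List Char)) = [] ++ [address.toList] by simp,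
        pyGet_neg_one_concat]
      dsimp only
      rw [show (((([] : List (List Char)) ++ [address.toList]).length : Int) - 1) = 0 by simp]
      rw [PySem.List.pyRange_one_eq_nil (by omega), List.foldl_nil]
      rw [show ([] ++ address.toList ++ [' ']) = address.toList ++ [' '] by simp]
      rw [slice_neg_one_dropLast, List.dropLast_concat, String.ofList_toList]
    have hB : transfrom_address_alt address = address := by
      unfold transfrom_address_alt
      rw [PySem.Str.rfind_eq, show (" " : String).toList = [' '] from rfl, rfind_no_space hsp]
      simp
    rw [hA, hB]
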